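-- pv_equiv track=rewrite | github.com/YueyingTIAN/CMT120Fundamentals-of-Programming- | c21013017.py | cliqueCounter
-- ===== SOURCE A (Python) =====
-- def cliqueCounter(network):
--
--     """
--     https://en.wikipedia.org/wiki/Bron%E2%80%93Kerbosch_algorithm
--
--     Firstly, defnite a helper function Bron_Kerbosch, implementing the
--     Bron–Kerbosch algorithm in the Wikipedia link (without pivoting version),
--     to get a list of all maximal cliques in the graph.
--
--     Then check for each vertex in the graph, how many maximal cliques
--     contain the vertex, and return the results.
--     """
--
--     # A helper function, which implements the
--     # Bron–Kerbosch algorithm to get all the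
--     # maximal cliques in the graph;
--     # the results will be in maximal_cliques
--     def Bron_Kerbosch(R, P, X, maximal_cliques):
--         if len(P) == 0 and len(X) == 0:
--             maximal_cliques.append(set(R))
--         for v in P[:]:
--             R_new = R[::]
--             R_new.append(v)
--
--             P_new = [i for i in P if network[v][i] == 1]
--             X_new = [i for i in X if network[v][i] == 1]
--
--             Bron_Kerbosch(R_new, P_new, X_new, maximal_cliques)
--
--             P.remove(v)
--             X.append(v)
--
--     maximal_cliques = []
--     n = len(network)
--
--     # Call the helper function to get the
--     # list of all maximal cliques
--     Bron_Kerbosch([], list(range(n)), [], maximal_cliques)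
--
--     res_list = []
--
--     # Check each node and calculate how many
--     # maximal cliques contain the node
--     # and append the number to the result
--     for i in range(n):
--         cnt = 0
--         for max_clique in maximal_cliques:
--             if i in max_clique:
--                 cnt += 1
--
--         res_list.append(cnt)
--
--     return res_list
-- ===== SOURCE B (Python) =====
-- def cliqueCounter(network):
--     """Plain DFS over cliques built in index order, with an explicit maximality
--     test per clique (no Bron-Kerbosch X set): a clique is counted exactly when
--     no vertex of the graph is a common out-neighbour of all its members; counts
--     go straight into a dict, no clique list is materialised."""
--     n = len(network)
--     counts = {}
--
--     def dfs(S, cand):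
--         if all(any(network[v][u] != 1 for v in S) for u in range(n)):
--             for v in S:
--                 counts[v] = counts.get(v, 0) + 1
--         for idx in range(len(cand)):
--             v = cand[idx]
--             dfs(S + [v], [u for u in cand[idx + 1:] if network[v][u] == 1])
--
--     dfs([], list(range(n)))
--     return [counts.get(i, 0) for i in range(n)]
-- ===== Notes on version B (the rewrite author's own statement) =====
-- stated objective: alternative
-- what changed: B drops Bron-Kerbosch's P/X bookkeeping entirely: it DFS-enumerates cliques in ascending index order and decides maximality by an explicit test (no vertex is a common out-neighbour of the whole clique), bumping per-vertex counts into a dict instead of materialising the clique list and scanning it once per vertex.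
import Mathlib
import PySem

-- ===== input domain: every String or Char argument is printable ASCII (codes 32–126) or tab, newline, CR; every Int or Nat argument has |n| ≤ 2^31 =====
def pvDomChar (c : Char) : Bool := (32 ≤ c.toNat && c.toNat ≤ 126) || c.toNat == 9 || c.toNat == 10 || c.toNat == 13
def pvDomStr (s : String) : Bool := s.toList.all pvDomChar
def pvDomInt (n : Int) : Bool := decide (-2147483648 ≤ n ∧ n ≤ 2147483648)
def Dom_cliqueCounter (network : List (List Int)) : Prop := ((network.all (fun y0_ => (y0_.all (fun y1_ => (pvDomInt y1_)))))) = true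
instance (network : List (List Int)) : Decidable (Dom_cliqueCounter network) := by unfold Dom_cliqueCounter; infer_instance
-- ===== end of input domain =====

-- B replaces Bron–Kerbosch's P/X bookkeeping with plain DFS clique enumeration in index order
-- plus an explicit per-clique maximality test, bumping counts into a dict as cliques are found.

-- ===== PORT A =====
-- network[v][u] == 1 (exact where both indices are in range; Python raises where pyGet? is none,
-- and Pre_ excludes exactly those inputs)
def pvEdge (net : List (List Int)) (v u : Int) : Bool :=
  ((PySem.List.pyGet? net v).bind (fun row => PySem.List.pyGet? row u)) == some 1

mutual
-- Bron_Kerbosch(R, P, X, maximal_cliques); the fuel argument bounds the recursion depth: the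
-- wrapper passes n+1, which is never exhausted on inputs satisfying Pre_ (|P| strictly decreases).
def bkA (net : List (List Int)) (fuel : Nat) (R P X : List Int) (acc : List (List Int)) : List (List Int) :=
  match fuel with
  | 0 => acc
  | f + 1 =>
    bkALoop net f R P X
      (if P.length = 0 ∧ X.length = 0 then acc ++ [PySem.Set.ofList R] else acc)
termination_by (fuel, 0)

-- 'for v in P[:]: … ; P.remove(v); X.append(v)': v is always the head of the current P, so the
-- snapshot iteration is structural recursion on P.
def bkALoop (net : List (List Int)) (fuel : Nat) (R P X : List Int) (acc : List (List Int)) : List (List Int) :=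
  match P with
  | [] => acc
  | v :: rest =>
    bkALoop net fuel R rest (X ++ [v])
      (bkA net fuel (R ++ [v]) ((v :: rest).filter (fun u => pvEdge net v u))
        (X.filter (fun u => pvEdge net v u)) acc)
termination_by (fuel, P.length + 1)
end

def cliqueCounter (network : List (List Int)) : List Int :=
  let n := network.length
  let cliques := bkA network (n + 1) [] (PySem.List.pyRange 0 (n : Int) 1) [] []
  -- 'for i in range(n): cnt = 0; for c in cliques: …; res.append(cnt)'
  (PySem.List.pyRange 0 (n : Int) 1).map
    (fun i => cliques.foldl (fun cnt c => if i ∈ c then cnt + 1 else cnt) (0 : Int))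

-- ===== PORT B =====
mutual
-- dfs(S, cand): 'if all(any(network[v][u] != 1 for v in S) for u in range(n)): bump';
-- same fuel scheme as bkA.
def bkB (net : List (List Int)) (fuel : Nat) (R P : List Int) (d : PySem.Dict Int Int) : PySem.Dict Int Int :=
  match fuel with
  | 0 => d
  | f + 1 =>
    bkBLoop net f R P
      (if (PySem.List.pyRange 0 (net.length : Int) 1).all
            (fun u => R.any (fun v => !pvEdge net v u))
       then R.foldl (fun d v => d.insert v (d.getD v 0 + 1)) d else d)
termination_by (fuel, 0)

-- 'for idx in range(len(cand)): v = cand[idx]; dfs(S + [v], [u for u in cand[idx+1:] if …])':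
-- v is the head and cand[idx+1:] the tail, so the loop is structural recursion on cand.
def bkBLoop (net : List (List Int)) (fuel : Nat) (R cand : List Int) (d : PySem.Dict Int Int) : PySem.Dict Int Int :=
  match cand with
  | [] => d
  | v :: rest =>
    bkBLoop net fuel R rest
      (bkB net fuel (R ++ [v]) (rest.filter (fun u => pvEdge net v u)) d)
termination_by (fuel, cand.length + 1)
end

def cliqueCounter_alt (network : List (List Int)) : List Int :=
  let n := network.length
  let d := bkB network (n + 1) [] (PySem.List.pyRange 0 (n : Int) 1) PySem.Dict.empty
  (PySem.List.pyRange 0 (n : Int) 1).map (fun i => d.getD i 0)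

-- ===== PRECONDITION & SPEC =====
-- Exactly the inputs on which the Python A returns: every row must have length ≥ n (the
-- algorithm indexes network[v][u] for all u < n; a shorter row is an IndexError) and every
-- diagonal entry must differ from 1 (network[v][v] == 1 keeps v in its own candidate set,
-- so A's recursion never terminates — RecursionError).
def Pre_cliqueCounter (network : List (List Int)) : Prop :=
  ∀ i : Nat, i < network.length →
    network.length ≤ (network.getD i []).length ∧ (network.getD i []).getD i 0 ≠ 1
instance (network : List (List Int)) : Decidable (Pre_cliqueCounter network) := by
  unfold Pre_cliqueCounter; infer_instance

def pvWitness_cliqueCounter : List (List Int) := [[0, 1], [1, 0]]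

def Spec_cliqueCounter (network : List (List Int)) (out : List Int) : Prop := out = cliqueCounter_alt network
instance (network : List (List Int)) (out : List Int) : Decidable (Spec_cliqueCounter network out) := by unfold Spec_cliqueCounter; infer_instance

-- ===== CLAIM (what is proved, stated in full; the proofs are below) =====
def Claim_equal_cliqueCounter : Prop := ∀ (network : List (List Int)), Dom_cliqueCounter network → Pre_cliqueCounter network → Spec_cliqueCounter network (cliqueCounter network)

-- ===== LEMMAS AND PROOFS =====

-- v is a legal vertex index
def pvInRange (net : List (List Int)) (v : Int) : Prop := 0 ≤ v ∧ v < (net.length : Int)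

-- the node invariant tying A's (R, P, X) to B's (R, cand = P): R is duplicate-free and
-- P ∪ X is exactly the set of legal vertices that are out-neighbours of all of R
def pvInv (net : List (List Int)) (R P X : List Int) : Prop :=
  R.Nodup ∧
  (∀ u : Int, (u ∈ P ∨ u ∈ X) ↔ (pvInRange net u ∧ ∀ v ∈ R, pvEdge net v u = true))

-- ghost emission list for B: the cliques bkB bumps, in order
mutual
def bkBe (net : List (List Int)) (fuel : Nat) (R P : List Int) : List (List Int) :=
  match fuel with
  | 0 => []
  | f + 1 =>
    (if (PySem.List.pyRange 0 (net.length : Int) 1).all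
          (fun u => R.any (fun v => !pvEdge net v u))
     then [R] else []) ++ bkBeLoop net f R P
termination_by (fuel, 0)

def bkBeLoop (net : List (List Int)) (fuel : Nat) (R cand : List Int) : List (List Int) :=
  match cand with
  | [] => []
  | v :: rest =>
    bkBe net fuel (R ++ [v]) (rest.filter (fun u => pvEdge net v u)) ++ bkBeLoop net fuel R rest
termination_by (fuel, cand.length + 1)
end

-- the per-clique bump B performs ('for v in S: counts[v] = counts.get(v, 0) + 1')
def pvBump (d : PySem.Dict Int Int) (c : List Int) : PySem.Dict Int Int :=
  c.foldl (fun d v => d.insert v (d.getD v 0 + 1)) d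

theorem bkBLoop_sim_of (net : List (List Int)) (f : Nat)
    (hS : ∀ R P d, bkB net f R P d = (bkBe net f R P).foldl pvBump d) :
    ∀ (cand R : List Int) (d : PySem.Dict Int Int),
      bkBLoop net f R cand d = (bkBeLoop net f R cand).foldl pvBump d := by
  intro cand
  induction cand with
  | nil => intro R d; simp [bkBLoop, bkBeLoop]
  | cons v rest ih =>
    intro R d
    simp only [bkBLoop, bkBeLoop]
    rw [List.foldl_append, ih, hS]

theorem bkB_sim (net : List (List Int)) :
    ∀ (f : Nat) (R P : List Int) (d : PySem.Dict Int Int),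
      bkB net f R P d = (bkBe net f R P).foldl pvBump d := by
  intro f
  induction f with
  | zero => intro R P d; simp [bkB, bkBe]
  | succ f ih =>
    intro R P d
    simp only [bkB, bkBe]
    rw [List.foldl_append, bkBLoop_sim_of net f ih]
    split_ifs
    · simp [pvBump]
    · simp

theorem bkALoop_append_of (net : List (List Int)) (f : Nat)
    (hA : ∀ R P X acc, bkA net f R P X acc = acc ++ bkA net f R P X []) :
    ∀ (P R X : List Int) (acc : List (List Int)),
      bkALoop net f R P X acc = acc ++ bkALoop net f R P X [] := by
  intro P
  induction P with
  | nil => intro R X acc; simp [bkALoop]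
  | cons v rest ih =>
    intro R X acc
    simp only [bkALoop]
    rw [ih R (X ++ [v]) (bkA net f (R ++ [v]) ((v :: rest).filter (fun u => pvEdge net v u))
          (X.filter (fun u => pvEdge net v u)) acc),
        ih R (X ++ [v]) (bkA net f (R ++ [v]) ((v :: rest).filter (fun u => pvEdge net v u))
          (X.filter (fun u => pvEdge net v u)) []),
        hA (R ++ [v]) ((v :: rest).filter (fun u => pvEdge net v u))
          (X.filter (fun u => pvEdge net v u)) acc,
        List.append_assoc]

theorem bkA_append (net : List (List Int)) :
    ∀ (f : Nat) (R P X : List Int) (acc : List (List Int)),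
      bkA net f R P X acc = acc ++ bkA net f R P X [] := by
  intro f
  induction f with
  | zero => simp [bkA]
  | succ f ih =>
    intro R P X acc
    simp only [bkA]
    rw [bkALoop_append_of net f ih P R X
          (if P.length = 0 ∧ X.length = 0 then acc ++ [PySem.Set.ofList R] else acc),
        bkALoop_append_of net f ih P R X
          (if P.length = 0 ∧ X.length = 0 then [] ++ [PySem.Set.ofList R] else [])]
    split_ifs <;> simp

-- a member of the candidate set is never already in R
theorem pvInv_notR (net : List (List Int))
    (hirr : ∀ v : Int, pvInRange net v → pvEdge net v v = false)
    {R P X : List Int} (h : pvInv net R P X) {v : Int} (hv : v ∈ P ∨ v ∈ X) : v ∉ R := by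
  intro hvR
  obtain ⟨hrng, hall⟩ := (h.2 v).1 hv
  have := hall v hvR
  rw [hirr v hrng] at this
  exact absurd this (by simp)

-- A's emission test (P and X empty) is B's explicit maximality test
theorem pvTest_iff (net : List (List Int)) {R P X : List Int} (h : pvInv net R P X) :
    (P.length = 0 ∧ X.length = 0) ↔
      ((PySem.List.pyRange 0 (net.length : Int) 1).all
        (fun u => R.any (fun v => !pvEdge net v u)) = true) := by
  constructor
  · rintro ⟨hP, hX⟩
    rw [List.length_eq_zero_iff] at hP hX
    subst hP; subst hX
    rw [List.all_eq_true]
    intro u hu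
    have hrng : pvInRange net u := by
      have := PySem.List.mem_pyRange_one.1 hu
      exact ⟨this.1, this.2⟩
    by_contra hany
    have : u ∈ ([] : List Int) ∨ u ∈ ([] : List Int) := by
      refine (h.2 u).2 ⟨hrng, ?_⟩
      intro v hv
      by_contra he
      apply hany
      rw [List.any_eq_true]
      exact ⟨v, hv, by simp [Bool.eq_false_iff.2 he]⟩
    simp at this
  · intro hall
    have hempty : ∀ u : Int, ¬ (u ∈ P ∨ u ∈ X) := by
      intro u hu
      obtain ⟨hrng, hedge⟩ := (h.2 u).1 hu
      rw [List.all_eq_true] at hall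
      have := hall u (PySem.List.mem_pyRange_one.2 ⟨hrng.1, hrng.2⟩)
      rw [List.any_eq_true] at this
      obtain ⟨v, hv, hne⟩ := this
      rw [hedge v hv] at hne
      exact absurd hne (by simp)
    constructor
    · rw [List.length_eq_zero_iff, List.eq_nil_iff_forall_not_mem]
      exact fun u hu => hempty u (Or.inl hu)
    · rw [List.length_eq_zero_iff, List.eq_nil_iff_forall_not_mem]
      exact fun u hu => hempty u (Or.inr hu)

-- descending into the branch for v preserves the invariant
theorem pvInv_child (net : List (List Int))
    (hirr : ∀ v : Int, pvInRange net v → pvEdge net v v = false)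
    {R P X : List Int} (h : pvInv net R P X) {v : Int} (hv : v ∈ P) :
    pvInv net (R ++ [v]) (P.filter (fun u => pvEdge net v u)) (X.filter (fun u => pvEdge net v u)) := by
  obtain ⟨h1, h2⟩ := h
  constructor
  · rw [List.nodup_append]
    refine ⟨h1, List.nodup_singleton v, ?_⟩
    intro a ha b hb
    rw [List.mem_singleton] at hb
    rw [hb]
    exact fun hav => (pvInv_notR net hirr ⟨h1, h2⟩ (Or.inl hv)) (hav ▸ ha)
  · intro u
    constructor
    · intro hu
      have hPX : u ∈ P ∨ u ∈ X := by
        rcases hu with hu | hu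
        · exact Or.inl (List.mem_of_mem_filter hu)
        · exact Or.inr (List.mem_of_mem_filter hu)
      have hvu : pvEdge net v u = true := by
        rcases hu with hu | hu <;> exact (List.mem_filter.1 hu).2
      obtain ⟨hrng, hall⟩ := (h2 u).1 hPX
      refine ⟨hrng, ?_⟩
      intro w hw
      rcases List.mem_append.1 hw with hw | hw
      · exact hall w hw
      · rw [List.mem_singleton] at hw
        rw [hw]
        exact hvu
    · rintro ⟨hrng, hall⟩
      have hvu : pvEdge net v u = true := hall v (List.mem_append.2 (Or.inr (by simp)))
      have : u ∈ P ∨ u ∈ X :=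
        (h2 u).2 ⟨hrng, fun w hw => hall w (List.mem_append.2 (Or.inl hw))⟩
      rcases this with h | h
      · exact Or.inl (List.mem_filter.2 ⟨h, hvu⟩)
      · exact Or.inr (List.mem_filter.2 ⟨h, hvu⟩)

-- moving v from P to X preserves the invariant
theorem pvInv_move (net : List (List Int)) {R P X : List Int} {v : Int}
    (h : pvInv net R (v :: P) X) : pvInv net R P (X ++ [v]) := by
  refine ⟨h.1, ?_⟩
  intro u
  rw [← h.2 u]
  simp only [List.mem_cons, List.mem_append]
  tauto

-- the joint walk: A's recursion emits exactly B's cliques, deduplicated, in the same order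
theorem bkALoop_corr (net : List (List Int))
    (hirr : ∀ v : Int, pvInRange net v → pvEdge net v v = false)
    (f : Nat)
    (hA : ∀ R P X : List Int, pvInv net R P X → P.length < f →
      bkA net f R P X [] = (bkBe net f R P).map PySem.Set.ofList ∧
      (∀ c ∈ bkBe net f R P, c.Nodup)) :
    ∀ P R X : List Int, pvInv net R P X → P.length ≤ f →
      bkALoop net f R P X [] = (bkBeLoop net f R P).map PySem.Set.ofList ∧
      (∀ c ∈ bkBeLoop net f R P, c.Nodup) := by
  intro P
  induction P with
  | nil =>
    intro R X _ _
    refine ⟨by simp [bkALoop, bkBeLoop], by simp [bkBeLoop]⟩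
  | cons v rest ih =>
    intro R X hinv hlen
    have hv : v ∈ v :: rest := List.mem_cons_self
    have hvr : pvInRange net v := ((hinv.2 v).1 (Or.inl hv)).1
    have hfilter : (v :: rest).filter (fun u => pvEdge net v u)
        = rest.filter (fun u => pvEdge net v u) := by
      rw [List.filter_cons]
      simp [hirr v hvr]
    have hchildInv := pvInv_child net hirr hinv hv
    rw [hfilter] at hchildInv
    have hflt : (rest.filter (fun u => pvEdge net v u)).length < f := by
      have h1 : (rest.filter (fun u => pvEdge net v u)).length ≤ rest.length :=
        List.length_filter_le _ _
      have h2 : rest.length + 1 ≤ f := by simpa using hlen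
      omega
    obtain ⟨hceq, hcnd⟩ := hA _ _ _ hchildInv hflt
    obtain ⟨hreq, hrnd⟩ := ih R (X ++ [v]) (pvInv_move net hinv) (by simp at hlen ⊢; omega)
    constructor
    · simp only [bkALoop, bkBeLoop]
      rw [bkALoop_append_of net f (bkA_append net f), hreq, hfilter, hceq, List.map_append]
    · intro c hc
      simp only [bkBeLoop] at hc
      rcases List.mem_append.1 hc with hc | hc
      · exact hcnd c hc
      · exact hrnd c hc

theorem bkA_corr (net : List (List Int))
    (hirr : ∀ v : Int, pvInRange net v → pvEdge net v v = false) :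
    ∀ (f : Nat) (R P X : List Int), pvInv net R P X → P.length < f →
      bkA net f R P X [] = (bkBe net f R P).map PySem.Set.ofList ∧
      (∀ c ∈ bkBe net f R P, c.Nodup) := by
  intro f
  induction f with
  | zero => intro R P X _ h; omega
  | succ f ihf =>
    intro R P X hinv hlen
    obtain ⟨hleq, hlnd⟩ := bkALoop_corr net hirr f ihf P R X hinv (by omega)
    have hstep : bkA net (f + 1) R P X [] =
        (if P.length = 0 ∧ X.length = 0 then [PySem.Set.ofList R] else [])
        ++ bkALoop net f R P X [] := by
      simp only [bkA]
      rw [bkALoop_append_of net f (bkA_append net f)]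
      split_ifs <;> simp
    rw [hstep, hleq]
    constructor
    · simp only [bkBe, List.map_append]
      congr 1
      by_cases ht : P.length = 0 ∧ X.length = 0
      · rw [if_pos ht, if_pos ((pvTest_iff net hinv).1 ht)]
        simp
      · rw [if_neg ht, if_neg (fun hc => ht ((pvTest_iff net hinv).2 hc))]
        simp
    · intro c hc
      simp only [bkBe] at hc
      rcases List.mem_append.1 hc with hc | hc
      · split_ifs at hc
        · rw [List.mem_singleton] at hc
          rw [hc]
          exact hinv.1
        · simp at hc
      · exact hlnd c hc

theorem pvBump_getD (c : List Int) :
    ∀ (d : PySem.Dict Int Int) (i : Int), c.Nodup →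
      (pvBump d c).getD i 0 = d.getD i 0 + (if i ∈ c then 1 else 0) := by
  induction c with
  | nil => intro d i _; simp [pvBump]
  | cons v cs ih =>
    intro d i hnd
    have hv : v ∉ cs := (List.nodup_cons.1 hnd).1
    have hcs := (List.nodup_cons.1 hnd).2
    simp only [pvBump, List.foldl_cons]
    have h2 := ih (d.insert v (d.getD v 0 + 1)) i hcs
    simp only [pvBump] at h2
    rw [h2, PySem.Dict.getD_insert]
    by_cases h : i = v
    · subst h
      simp [hv]
    · simp [h, List.mem_cons]

theorem foldl_pvBump_getD (L : List (List Int)) :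
    ∀ (d : PySem.Dict Int Int) (i : Int), (∀ c ∈ L, c.Nodup) →
      (L.foldl pvBump d).getD i 0
        = L.foldl (fun cnt c => if i ∈ c then cnt + 1 else cnt) (d.getD i 0) := by
  induction L with
  | nil => intro d i _; simp
  | cons c L ih =>
    intro d i h
    simp only [List.foldl_cons]
    rw [ih _ i (fun c hc => h c (List.mem_cons_of_mem _ hc)),
        pvBump_getD c d i (h c List.mem_cons_self)]
    congr 1
    split_ifs <;> omega

-- pvEdge on legal indices reads the matrix entries Pre_ speaks about
theorem pyGet?_pos {α : Type} (xs : List α) (i : Int) (h0 : 0 ≤ i) (h1 : i.toNat < xs.length) :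
    PySem.List.pyGet? xs i = some xs[i.toNat] := by
  unfold PySem.List.pyGet? PySem.List.pyIdx?
  rw [if_pos h0, if_pos (by omega : i < (xs.length : Int)), Option.bind_some,
    List.getElem?_eq_getElem h1]

theorem pvEdge_eq_getD (net : List (List Int)) (v u : Int)
    (hv : pvInRange net v) (hu : pvInRange net u)
    (hrow : net.length ≤ (net.getD v.toNat []).length) :
    pvEdge net v u = ((net.getD v.toNat []).getD u.toNat 0 == 1) := by
  obtain ⟨hv0, hv1⟩ := hv
  obtain ⟨hu0, hu1⟩ := hu
  have hvn : v.toNat < net.length := by omega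
  have hun : u.toNat < (net.getD v.toNat []).length := by omega
  have hrowG : net.getD v.toNat [] = net[v.toNat] := List.getD_eq_getElem net [] hvn
  unfold pvEdge
  rw [pyGet?_pos net v hv0 hvn, Option.bind_some, ← hrowG,
    pyGet?_pos (net.getD v.toNat []) u hu0 hun, Option.some_beq_some,
    List.getD_eq_getElem (net.getD v.toNat []) 0 hun]

-- the invariant at the root call
theorem pvInv_root (net : List (List Int)) :
    pvInv net [] (PySem.List.pyRange 0 (net.length : Int) 1) [] := by
  refine ⟨List.nodup_nil, ?_⟩
  intro u
  constructor
  · intro hu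
    rcases hu with hu | hu
    · have := PySem.List.mem_pyRange_one.1 hu
      exact ⟨⟨this.1, this.2⟩, by simp⟩
    · simp at hu
  · rintro ⟨hrng, -⟩
    exact Or.inl (PySem.List.mem_pyRange_one.2 ⟨hrng.1, hrng.2⟩)

-- ===== VERDICT (by name: the statement is the Claim_ definition above) =====
theorem cliqueCounter_spec : Claim_equal_cliqueCounter := by
  intro network _ hpre
  unfold Spec_cliqueCounter
  have hirr : ∀ v : Int, pvInRange network v → pvEdge network v v = false := by
    intro v hv
    obtain ⟨hv0, hv1⟩ := hv
    have hvn : v.toNat < network.length := by omega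
    rw [pvEdge_eq_getD network v v ⟨hv0, hv1⟩ ⟨hv0, hv1⟩ (hpre v.toNat hvn).1]
    exact beq_eq_false_iff_ne.2 (hpre v.toNat hvn).2
  have hlenP : (PySem.List.pyRange 0 (network.length : Int) 1).length < network.length + 1 := by
    rw [PySem.List.length_pyRange_one]
    omega
  obtain ⟨heq, hnd⟩ := bkA_corr network hirr (network.length + 1) []
    (PySem.List.pyRange 0 (network.length : Int) 1) [] (pvInv_root network) hlenP
  simp only [cliqueCounter, cliqueCounter_alt]
  apply List.map_congr_left
  intro i _
  rw [bkB_sim, foldl_pvBump_getD _ _ i hnd, PySem.Dict.getD_empty, heq]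
  rw [PySem.List.foldl_ite_add_one (fun c => i ∈ c), PySem.List.foldl_ite_add_one (fun c => i ∈ c)]
  congr 1
  rw [List.countP_map]
  congr 1
  apply List.countP_congr
  intro c _
  simp [PySem.Set.mem_ofList]
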